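-- pv_equiv track=rewrite | github.com/whytehoux-projecty/MIS | backend_api/app/utils/session_code.py | validate_scanned_pattern
-- ===== SOURCE A (Python) =====
-- def validate_scanned_pattern(scanned_pattern: str, stored_code: str, obfuscation_map: dict) -> bool:
--     """
--     Validate that a scanned pattern matches the stored session code.
--
--     The scanned pattern should have 'X' in the hidden positions and
--     the correct visible characters in the visible positions.
--
--     Args:
--         scanned_pattern: The pattern from the scanned QR code
--         stored_code: The original full session code
--         obfuscation_map: The map showing which positions are hidden
--
--     Returns:
--         bool: True if the pattern is valid, False otherwise
--     """
--     if not scanned_pattern or not stored_code or not obfuscation_map: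
--         return False
--
--     if len(scanned_pattern) != len(stored_code):
--         return False
--
--     hidden_indices = set(obfuscation_map.get("hidden_indices", []))
--
--     for i, (scanned_char, original_char) in enumerate(zip(scanned_pattern, stored_code)):
--         if i in hidden_indices:
--             # Hidden positions must be 'X' in the scanned pattern
--             if scanned_char != 'X':
--                 return False
--         else:
--             # Visible positions must match the original code
--             if scanned_char != original_char:
--                 return False
--
--     return True
-- ===== SOURCE B (Python) =====
-- def validate_scanned_pattern(scanned_pattern: str, stored_code: str, obfuscation_map: dict) -> bool:
--     if not scanned_pattern or not stored_code or not obfuscation_map: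
--         return False
--     n = len(stored_code)
--     if len(scanned_pattern) != n:
--         return False
--     expected = list(stored_code)
--     for i in obfuscation_map.get("hidden_indices", []):
--         if 0 <= i < n:
--             expected[i] = 'X'
--     return scanned_pattern == ''.join(expected)
-- ===== Notes on version B (the rewrite author's own statement) =====
-- stated objective: alternative
-- what changed: Instead of scanning every character and testing set membership per position, B never builds a set: it iterates over the hidden-index list itself, overwriting those positions of a mutable copy of the stored code with 'X', then does one whole-string equality; out-of-range indices are skipped, matching A's ignoring them.
import Mathlib
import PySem

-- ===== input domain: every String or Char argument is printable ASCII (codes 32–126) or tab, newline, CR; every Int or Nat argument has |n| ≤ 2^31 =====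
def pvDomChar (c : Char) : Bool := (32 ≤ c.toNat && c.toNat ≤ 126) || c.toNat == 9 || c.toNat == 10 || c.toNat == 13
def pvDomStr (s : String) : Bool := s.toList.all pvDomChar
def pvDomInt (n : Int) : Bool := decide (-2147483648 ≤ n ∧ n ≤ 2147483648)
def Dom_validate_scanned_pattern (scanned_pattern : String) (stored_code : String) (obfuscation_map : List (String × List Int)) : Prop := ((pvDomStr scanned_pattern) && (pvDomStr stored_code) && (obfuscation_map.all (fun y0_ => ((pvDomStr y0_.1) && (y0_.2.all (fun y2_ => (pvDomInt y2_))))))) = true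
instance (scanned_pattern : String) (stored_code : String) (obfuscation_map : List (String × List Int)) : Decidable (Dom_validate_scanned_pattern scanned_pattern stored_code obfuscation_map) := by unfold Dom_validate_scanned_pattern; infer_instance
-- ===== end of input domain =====

-- B drives the work off the hidden-index LIST (no set built): it overwrites those positions of a
-- copy of the stored code with 'X' and compares once, instead of A's per-character membership loop.

-- ===== PORT A =====
-- the 'for i, (scanned_char, original_char) in enumerate(zip(...))' loop with early returns
def vspLoopA (hidden : PySem.Set Int) : Int → List (Char × Char) → Bool
  | _, [] => true
  | i, (sc, oc) :: rest =>
    if hidden.contains i then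
      if sc ≠ 'X' then false else vspLoopA hidden (i + 1) rest
    else
      if sc ≠ oc then false else vspLoopA hidden (i + 1) rest

def validate_scanned_pattern (scanned_pattern : String) (stored_code : String) (obfuscation_map : List (String × List Int)) : Bool :=
  if scanned_pattern.toList = [] ∨ stored_code.toList = [] ∨ obfuscation_map = [] then false
  else if scanned_pattern.toList.length ≠ stored_code.toList.length then false
  else
    let hidden := PySem.Set.ofList (((obfuscation_map.find? (fun p => p.1 == "hidden_indices")).map Prod.snd).getD [])
    vspLoopA hidden 0 (scanned_pattern.toList.zip stored_code.toList)

-- ===== PORT B =====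
-- the 'for i in obfuscation_map.get("hidden_indices", []): if 0 <= i < n: expected[i] = "X"' loop
def validate_scanned_pattern_alt (scanned_pattern : String) (stored_code : String) (obfuscation_map : List (String × List Int)) : Bool :=
  if scanned_pattern.toList = [] ∨ stored_code.toList = [] ∨ obfuscation_map = [] then false
  else
    let n : Int := stored_code.toList.length
    if scanned_pattern.toList.length ≠ stored_code.toList.length then false
    else
      let expected :=
        (((obfuscation_map.find? (fun p => p.1 == "hidden_indices")).map Prod.snd).getD []).foldl
          (fun acc i => if 0 ≤ i ∧ i < n then acc.set i.toNat 'X' else acc)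
          stored_code.toList
      scanned_pattern.toList == expected

-- ===== PRECONDITION & SPEC =====
def Spec_validate_scanned_pattern (scanned_pattern : String) (stored_code : String) (obfuscation_map : List (String × List Int)) (out : Bool) : Prop := out = validate_scanned_pattern_alt scanned_pattern stored_code obfuscation_map
instance (scanned_pattern : String) (stored_code : String) (obfuscation_map : List (String × List Int)) (out : Bool) : Decidable (Spec_validate_scanned_pattern scanned_pattern stored_code obfuscation_map out) := by unfold Spec_validate_scanned_pattern; infer_instance

-- ===== CLAIM (what is proved, stated in full; the proofs are below) =====
def Claim_equal_validate_scanned_pattern : Prop := ∀ (scanned_pattern : String) (stored_code : String) (obfuscation_map : List (String × List Int)), Dom_validate_scanned_pattern scanned_pattern stored_code obfuscation_map → Spec_validate_scanned_pattern scanned_pattern stored_code obfuscation_map (validate_scanned_pattern scanned_pattern stored_code obfuscation_map)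

-- ===== LEMMAS AND PROOFS =====

-- B's fold: length is preserved and position j holds 'X' iff j occurs in the index list.
theorem foldl_set_length (n : Int) (l : List Int) (acc : List Char) :
    (l.foldl (fun acc i => if 0 ≤ i ∧ i < n then acc.set i.toNat 'X' else acc) acc).length
      = acc.length := by
  induction l generalizing acc with
  | nil => rfl
  | cons i l ih =>
    simp only [List.foldl_cons]
    split_ifs <;> simp [ih]

theorem foldl_set_getElem (n : Int) (l : List Int) (acc : List Char)
    (hacc : (acc.length : Int) = n) (j : Nat) (hj : j < acc.length) :
    (l.foldl (fun acc i => if 0 ≤ i ∧ i < n then acc.set i.toNat 'X' else acc) acc)[j]'(by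
        rw [foldl_set_length]; exact hj)
      = if (j : Int) ∈ l then 'X' else acc[j] := by
  induction l generalizing acc with
  | nil => simp
  | cons i l ih =>
    simp only [List.foldl_cons, List.mem_cons]
    by_cases hr : 0 ≤ i ∧ i < n
    · have hlen : (acc.set i.toNat 'X').length = acc.length := by simp
      simp only [if_pos hr]
      rw [ih (acc.set i.toNat 'X') (by simpa using hacc) (by omega)]
      by_cases ht : (j : Int) ∈ l
      · simp [ht]
      · by_cases heq : (j : Int) = i
        · have : i.toNat = j := by omega
          simp [heq, this]
        · have : i.toNat ≠ j := by omega
          simp [ht, heq, List.getElem_set_ne this]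
    · simp only [if_neg hr]
      rw [ih acc hacc hj]
      have heq : (j : Int) ≠ i := by omega
      simp [heq]

-- A's early-exit loop over zip equals "scanned = stored masked by the set", position-wise.
theorem vspLoopA_eq (h : PySem.Set Int) :
    ∀ (st sp : List Char) (i : Int), sp.length = st.length →
      vspLoopA h i (sp.zip st) =
        (sp == (PySem.List.enumerate st i).map (fun ic => if h.contains ic.1 then 'X' else ic.2)) := by
  intro st
  induction st with
  | nil =>
    intro sp i hl
    have : sp = [] := List.eq_nil_of_length_eq_zero hl
    subst this
    simp [vspLoopA, PySem.List.enumerate]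
  | cons b st' ih =>
    intro sp i hl
    cases sp with
    | nil => simp at hl
    | cons a sp' =>
      have hl' : sp'.length = st'.length := by simpa using hl
      simp only [List.zip_cons_cons, vspLoopA, PySem.List.enumerate_cons, List.map_cons,
        List.cons_beq_cons, ih sp' (i + 1) hl']
      by_cases hm : i ∈ h
      · by_cases hx : a = 'X' <;> simp [hm, hx]
      · by_cases hx : a = b <;> simp [hm, hx]

-- the masked enumerate-map (A's characterisation) IS B's fold result
theorem masked_eq_foldl (st : List Char) (l : List Int) :
    (PySem.List.enumerate st 0).map
        (fun ic => if (PySem.Set.ofList l).contains ic.1 then 'X' else ic.2)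
      = l.foldl (fun acc i => if 0 ≤ i ∧ i < (st.length : Int) then acc.set i.toNat 'X' else acc) st := by
  apply List.ext_getElem
  · simp [foldl_set_length, PySem.List.length_enumerate]
  · intro j hj₁ hj₂
    have hjs : j < st.length := by
      simpa [PySem.List.length_enumerate] using hj₁
    rw [foldl_set_getElem (st.length : Int) l st rfl j hjs,
      List.getElem_map, PySem.List.getElem_enumerate]
    simp

-- ===== VERDICT (by name: the statement is the Claim_ definition above) =====
theorem validate_scanned_pattern_spec : Claim_equal_validate_scanned_pattern := by
  unfold Claim_equal_validate_scanned_pattern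
  intro sp st m _
  unfold Spec_validate_scanned_pattern validate_scanned_pattern validate_scanned_pattern_alt
  split_ifs with h1 h2
  · rfl
  · rfl
  · rw [vspLoopA_eq _ st.toList sp.toList 0 (by omega), masked_eq_foldl]
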